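-- pv_equiv track=rewrite | github.com/MlvPrasadOfficial/SCALER_DSML_MAR_2022_SOLUTIONS_BY_MLV_PRASAD | AA_ASSIGNMENTS/Day017 - Intermediate DSA  Sorting/a01.py | solve
-- ===== SOURCE A (Python) =====
-- def solve(A):
--     A.sort()
--     n = len(A)
--     for i in range(n-1):
--         if A[i] == A[i+1]:
--             continue
--
--         if A[i] == n-i-1:
--             return 1
--
--     if A[n-1] == 0:
--         return 1
--
--     return -1
-- ===== SOURCE B (Python) =====
-- def solve(A):
--     # Counting buckets + suffix accumulation instead of sort-and-scan.
--     # Note: unlike A, this does not sort A in place (return value only).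
--     n = len(A)
--     cnt = [0] * (n + 1)
--     present = [False] * (n + 1)
--     for x in A:
--         if 0 <= x < n:
--             cnt[x] += 1
--             present[x] = True
--         elif x >= n:
--             cnt[n] += 1
--     greater = 0
--     for v in range(n - 1, -1, -1):
--         greater += cnt[v + 1]
--         if present[v] and greater == v:
--             return 1
--     return -1
-- ===== Notes on version B (the rewrite author's own statement) =====
-- stated objective: faster
-- what changed: Replaces A's sort-then-linear-scan (looking for a sorted position i with A[i] != A[i+1] and A[i] == n-i-1) by an O(n) counting-bucket pass: counts are bucketed into cnt[0..n] (values >= n clamped to bucket n), a presence table marks which candidate values occur, and a single countdown accumulates suffix sums to test count(>v) == v; B also does not sort the caller's list in place.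
-- crash fix: On the empty list A raises IndexError (the final A[n-1] check); B returns -1. — e.g. on solve([]): A raises IndexError, B returns -1
import Mathlib
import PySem

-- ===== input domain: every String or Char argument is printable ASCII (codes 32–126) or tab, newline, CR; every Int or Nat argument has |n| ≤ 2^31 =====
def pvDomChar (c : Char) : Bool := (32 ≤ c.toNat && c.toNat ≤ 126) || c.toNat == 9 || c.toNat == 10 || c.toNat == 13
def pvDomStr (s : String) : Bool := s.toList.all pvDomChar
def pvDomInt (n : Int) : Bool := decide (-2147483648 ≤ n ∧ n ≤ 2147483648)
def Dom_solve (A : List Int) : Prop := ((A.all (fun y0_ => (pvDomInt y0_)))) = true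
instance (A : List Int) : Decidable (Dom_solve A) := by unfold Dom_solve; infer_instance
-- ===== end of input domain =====

-- B replaces A's sort-then-scan by counting buckets with a suffix-sum accumulation (a different algorithm).
-- A sorts its argument in place; B does not mutate it — the equivalence proved here is about the return value only.

-- ===== PORT A =====
-- the early-return for-loop of A: i over range(n-1) (skip duplicates, test A[i] == n-i-1), then the final A[n-1] == 0 check
def solveLoopA (S : List Int) (n : Nat) (i : Nat) : Int :=
  if _h : i < n - 1 then
    if PySem.List.pyGetD S (i : Int) 0 = PySem.List.pyGetD S ((i : Int) + 1) 0 then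
      solveLoopA S n (i + 1)
    else if PySem.List.pyGetD S (i : Int) 0 = (n : Int) - (i : Int) - 1 then 1
    else solveLoopA S n (i + 1)
  else if PySem.List.pyGetD S ((n : Int) - 1) 0 = 0 then 1 else -1
termination_by n - 1 - i

def solve (A : List Int) : Int :=
  let S := PySem.List.sorted A (fun x => x) false
  let n := S.length
  solveLoopA S n 0

-- ===== PORT B =====
-- one pass filling the buckets cnt[0..n] (values ≥ n clamped into bucket n) and the presence table,
-- then a countdown accumulating the suffix sums
def bStep (n : Nat) (st : List Int × List Bool) (x : Int) : List Int × List Bool :=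
  if 0 ≤ x ∧ x < (n : Int) then
    (PySem.List.pySetD st.1 x (PySem.List.pyGetD st.1 x 0 + 1),
     PySem.List.pySetD st.2 x true)
  else if (n : Int) ≤ x then
    (PySem.List.pySetD st.1 (n : Int) (PySem.List.pyGetD st.1 (n : Int) 0 + 1), st.2)
  else st

def bLoop (cnt : List Int) (pres : List Bool) (g : Int) : Nat → Int
  | 0 => -1
  | k + 1 =>
    let g' := g + PySem.List.pyGetD cnt ((k : Int) + 1) 0
    if PySem.List.pyGetD pres (k : Int) false = true ∧ g' = (k : Int) then 1
    else bLoop cnt pres g' k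

def solve_alt (A : List Int) : Int :=
  let n := A.length
  let st := A.foldl (bStep n) (List.replicate (n + 1) 0, List.replicate (n + 1) false)
  bLoop st.1 st.2 0 n

-- ===== PRECONDITION & SPEC =====
-- A indexes A[n-1], which raises IndexError on the empty list; on every non-empty list A returns normally.
def Pre_solve (A : List Int) : Prop := A ≠ []
instance (A : List Int) : Decidable (Pre_solve A) := by unfold Pre_solve; infer_instance
def pvWitness_solve : List Int := [2, 0, 2]

-- On the empty list A raises IndexError (the final A[n-1] check) while B returns -1.
def Raises_solve (A : List Int) : Prop := A = []
instance (A : List Int) : Decidable (Raises_solve A) := by unfold Raises_solve; infer_instance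
def pvRaiseWitness_solve : List Int := []
def pvRaiseWitnessOut_solve : Int := -1

def Spec_solve (A : List Int) (out : Int) : Prop := out = solve_alt A
instance (A : List Int) (out : Int) : Decidable (Spec_solve A out) := by unfold Spec_solve; infer_instance

-- ===== CLAIM (what is proved, stated in full; the proofs are below) =====
def Claim_equal_solve : Prop := ∀ (A : List Int), Dom_solve A → Pre_solve A → Spec_solve A (solve A)
def Claim_raises_solve : Prop := (∀ (A : List Int), Dom_solve A → Raises_solve A → ¬ Pre_solve A) ∧ (Dom_solve (pvRaiseWitness_solve) ∧ Raises_solve (pvRaiseWitness_solve) ∧ solve_alt (pvRaiseWitness_solve) = pvRaiseWitnessOut_solve)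

-- ===== LEMMAS AND PROOFS =====

-- the common characterisation: some element v of A has exactly v strictly greater elements
abbrev Good (A : List Int) : Prop :=
  ∃ v ∈ A, (A.countP (fun x => decide (v < x)) : Int) = v

-- condition tested by A's loop at index j
abbrev CondA (S : List Int) (n j : Nat) : Prop :=
  S.getD j 0 ≠ S.getD (j + 1) 0 ∧ S.getD j 0 = (n : Int) - (j : Int) - 1

theorem loopA_eq (S : List Int) (n : Nat) (hn : 1 ≤ n) :
    ∀ i : Nat, solveLoopA S n i =
      if (∃ j < n, i ≤ j ∧ j + 1 < n ∧ CondA S n j) then 1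
      else if S.getD (n - 1) 0 = 0 then 1 else -1 := by
  have hcast1 : ((n : Int) - 1) = (((n - 1 : Nat)) : Int) := by omega
  suffices H : ∀ d i, n - 1 - i ≤ d → solveLoopA S n i =
      if (∃ j < n, i ≤ j ∧ j + 1 < n ∧ CondA S n j) then 1
      else if S.getD (n - 1) 0 = 0 then 1 else -1 by
    exact fun i => H (n - 1 - i) i le_rfl
  intro d
  induction d with
  | zero =>
    intro i hi
    have hni : ¬ i < n - 1 := by omega
    unfold solveLoopA
    rw [dif_neg hni, hcast1, PySem.List.pyGetD_natCast]
    rw [if_neg (show ¬ (∃ j < n, i ≤ j ∧ j + 1 < n ∧ CondA S n j) by rintro ⟨j, hjl, hij, hjn, _⟩; omega)]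
  | succ d ih =>
    intro i hi
    by_cases hil : i < n - 1
    · unfold solveLoopA
      rw [dif_pos hil]
      have hcast2 : ((i : Int) + 1) = (((i + 1 : Nat)) : Int) := by omega
      rw [hcast2, PySem.List.pyGetD_natCast, PySem.List.pyGetD_natCast]
      by_cases he : S.getD i 0 = S.getD (i + 1) 0
      · rw [if_pos he, ih (i + 1) (by omega)]
        congr 1
        apply propext
        constructor
        · rintro ⟨j, hjl, hij, hjn, hcond⟩
          exact ⟨j, hjl, by omega, hjn, hcond⟩
        · rintro ⟨j, hjl, hij, hjn, hcond⟩
          by_cases hji : j = i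
          · exfalso; exact hcond.1 (by rw [← hji] at he; exact he)
          · exact ⟨j, hjl, by omega, hjn, hcond⟩
      · rw [if_neg he]
        by_cases hv : S.getD i 0 = (n : Int) - (i : Int) - 1
        · rw [if_pos hv, if_pos ⟨i, by omega, le_rfl, by omega, he, hv⟩]
        · rw [if_neg hv, ih (i + 1) (by omega)]
          congr 1
          apply propext
          constructor
          · rintro ⟨j, hjl, hij, hjn, hcond⟩
            exact ⟨j, hjl, by omega, hjn, hcond⟩
          · rintro ⟨j, hjl, hij, hjn, hcond⟩
            by_cases hji : j = i
            · exfalso; rw [hji] at hcond; exact hv hcond.2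
            · exact ⟨j, hjl, by omega, hjn, hcond⟩
    · unfold solveLoopA
      rw [dif_neg hil, hcast1, PySem.List.pyGetD_natCast]
      rw [if_neg (show ¬ (∃ j < n, i ≤ j ∧ j + 1 < n ∧ CondA S n j) by rintro ⟨j, hjl, hij, hjn, _⟩; omega)]

theorem pairwise_mono (S : List Int) (hp : S.Pairwise (· ≤ ·)) (a b : Nat) (hab : a ≤ b)
    (hb : b < S.length) : S[a]'(by omega) ≤ S[b] := by
  rcases Nat.lt_or_ge a b with h | h
  · exact (List.pairwise_iff_getElem.1 hp) a b _ hb h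
  · have : a = b := by omega
    subst this; exact le_rfl

theorem countP_gt_of_bounds (S : List Int) (v : Int) (t : Nat) (ht : t ≤ S.length)
    (hlow : ∀ q, (hq : q < t) → (hq2 : q < S.length) → S[q] ≤ v)
    (hhigh : ∀ q, t ≤ q → (hq : q < S.length) → v < S[q]) :
    S.countP (fun x => decide (v < x)) = S.length - t := by
  conv_lhs => rw [← List.take_append_drop t S]
  rw [List.countP_append]
  have h1 : (S.take t).countP (fun x => decide (v < x)) = 0 := by
    rw [List.countP_eq_zero]
    intro a ha
    obtain ⟨q, hq, hEq⟩ := List.mem_take_iff_getElem.1 ha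
    have := hlow q (by omega) (by omega)
    rw [hEq] at this
    simp only [decide_eq_true_eq]
    omega
  have h2 : (S.drop t).countP (fun x => decide (v < x)) = (S.drop t).length := by
    rw [List.countP_eq_length]
    intro a ha
    obtain ⟨q, hq, hEq⟩ := List.mem_iff_getElem.1 ha
    rw [List.getElem_drop] at hEq
    have := hhigh (t + q) (by omega) (by rw [List.length_drop] at hq; omega)
    rw [hEq] at this
    simp only [decide_eq_true_eq]
    omega
  rw [h1, h2, List.length_drop]
  omega

theorem cond_iff_good (A S : List Int) (hS : S.Perm A) (hsort : S.Pairwise (· ≤ ·))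
    (hne : 1 ≤ S.length) :
    ((∃ j < S.length, 0 ≤ j ∧ j + 1 < S.length ∧ CondA S S.length j)
      ∨ S.getD (S.length - 1) 0 = 0) ↔ Good A := by
  have hcount : ∀ w : Int, A.countP (fun x => decide (w < x)) = S.countP (fun x => decide (w < x)) :=
    fun w => (hS.symm.countP_eq _)
  constructor
  · rintro (⟨j, hjl, _, hjn, hne', hval⟩ | hlast)
    · -- the loop hit: v := S[j]
      have hj : j < S.length := by omega
      have hj1 : j + 1 < S.length := hjn
      rw [List.getD_eq_getElem S 0 hj, List.getD_eq_getElem S 0 hj1] at hne'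
      rw [List.getD_eq_getElem S 0 hj] at hval
      have hlt : S[j] < S[j + 1] := lt_of_le_of_ne (pairwise_mono S hsort j (j+1) (by omega) hj1) hne'
      refine ⟨S[j], hS.mem_iff.1 (List.getElem_mem hj), ?_⟩
      rw [hcount]
      rw [countP_gt_of_bounds S (S[j]) (j + 1) (by omega)
        (fun q hq hq2 => pairwise_mono S hsort q j (by omega) hj)
        (fun q hq hq2 => lt_of_lt_of_le hlt (pairwise_mono S hsort (j+1) q hq hq2))]
      rw [hval]
      omega
    · -- last element is 0
      have hl : S.length - 1 < S.length := by omega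
      rw [List.getD_eq_getElem S 0 hl] at hlast
      refine ⟨0, hS.mem_iff.1 (by rw [← hlast]; exact List.getElem_mem hl), ?_⟩
      rw [hcount]
      rw [countP_gt_of_bounds S 0 S.length le_rfl
        (fun q hq hq2 => by
          have := pairwise_mono S hsort q (S.length - 1) (by omega) hl
          omega)
        (fun q hq hq2 => by omega)]
      simp
  · rintro ⟨v, hmem, hcnt⟩
    obtain ⟨p, hp, hpv⟩ := List.mem_iff_getElem.1 (hS.mem_iff.2 hmem)
    set c := S.countP (fun x => decide (v < x)) with hcdef
    have hcA : (c : Int) = v := by rw [hcdef, ← hcount, hcnt]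
    have hcn : c < S.length := by
      have hsum := List.length_eq_countP_add_countP (fun x => decide (v < x)) (l := S)
      have hpos : 0 < S.countP (fun a => decide ¬(decide (v < a)) = true) := by
        rw [List.countP_pos_iff]
        refine ⟨v, hS.mem_iff.2 hmem, by simp⟩
      omega
    set t := S.length - c with htdef
    have ht1 : 1 ≤ t := by omega
    have htn : t ≤ S.length := by omega
    have hhigh : ∀ q, t ≤ q → (hq : q < S.length) → v < S[q] := by
      have hSt : ∀ (h : t < S.length), v < S[t] := by
        intro h
        by_contra hle
        push Not at hle
        have hcle : c ≤ S.length - (t + 1) := by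
          calc c = S.countP (fun x => decide (v < x)) := hcdef
          _ = (S.take (t+1)).countP _ + (S.drop (t+1)).countP _ := by
                conv_lhs => rw [← List.take_append_drop (t+1) S]
                rw [List.countP_append]
          _ ≤ 0 + (S.drop (t+1)).length := by
                have hz : (S.take (t+1)).countP (fun x => decide (v < x)) = 0 := by
                  rw [List.countP_eq_zero]
                  intro a ha
                  obtain ⟨q, hq, hEq⟩ := List.mem_take_iff_getElem.1 ha
                  have h2 := pairwise_mono S hsort q t (by omega) h
                  rw [hEq] at h2
                  simp only [decide_eq_true_eq]
                  omega
                rw [hz]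
                exact Nat.add_le_add le_rfl List.countP_le_length
          _ = S.length - (t + 1) := by rw [List.length_drop]; omega
        omega
      intro q hq hql
      exact lt_of_lt_of_le (hSt (by omega)) (pairwise_mono S hsort t q hq hql)
    have hlow : S[t - 1]'(by omega) = v := by
      have hle : S[t - 1]'(by omega) ≤ v := by
        by_contra hgt
        push Not at hgt
        have : c ≥ S.length - (t - 1) := by
          calc S.length - (t-1) = (S.drop (t-1)).length := by rw [List.length_drop]
          _ = (S.drop (t-1)).countP (fun x => decide (v < x)) := by
                rw [Eq.comm, List.countP_eq_length]
                intro a ha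
                obtain ⟨q, hq, hEq⟩ := List.mem_iff_getElem.1 ha
                rw [List.getElem_drop] at hEq
                have h2 := pairwise_mono S hsort (t-1) (t-1+q) (by omega)
                  (by rw [List.length_drop] at hq; omega)
                rw [hEq] at h2
                simp only [decide_eq_true_eq]
                omega
          _ ≤ S.countP (fun x => decide (v < x)) := by
                conv_rhs => rw [← List.take_append_drop (t-1) S]
                rw [List.countP_append]
                omega
          _ = c := rfl
        omega
      have hge : v ≤ S[t - 1]'(by omega) := by
        have hpt : p ≤ t - 1 := by
          by_contra hpt
          push Not at hpt
          have := hhigh p (by omega) hp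
          omega
        have := pairwise_mono S hsort p (t-1) hpt (by omega)
        omega
      omega
    by_cases hc0 : c = 0
    · right
      have hts : t = S.length := by omega
      rw [List.getD_eq_getElem S 0 (by omega : S.length - 1 < S.length)]
      have hv0 : v = 0 := by omega
      have h2 : S[S.length - 1]'(by omega) = S[t - 1]'(by omega) := by
        congr 1
        omega
      omega
    · left
      refine ⟨t - 1, by omega, by omega, by omega, ?_, ?_⟩
      · rw [List.getD_eq_getElem S 0 (by omega), List.getD_eq_getElem S 0 (by omega)]
        have h2 : t - 1 + 1 = t := by omega
        intro hEq
        have := hhigh (t - 1 + 1) (by omega) (by omega)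
        rw [← hEq, hlow] at this
        exact lt_irrefl _ this
      · rw [List.getD_eq_getElem S 0 (by omega)]
        rw [hlow]
        omega

theorem solve_eq_good (A : List Int) (hA : A ≠ []) :
    solve A = if Good A then 1 else -1 := by
  unfold solve
  have hperm := PySem.List.sorted_perm A (fun x => x) false
  have hpair : (PySem.List.sorted A (fun x => x) false).Pairwise (· ≤ ·) := by
    have := PySem.List.sorted_pairwise A (fun x => x)
    exact this
  set S := PySem.List.sorted A (fun x => x) false with hSdef
  have hlen : 1 ≤ S.length := by
    rw [hperm.length_eq]
    cases A with
    | nil => exact absurd rfl hA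
    | cons a l => simp
  rw [loopA_eq S S.length hlen 0]
  have hiff := cond_iff_good A S hperm hpair hlen
  by_cases hG : Good A
  · rw [if_pos hG]
    rcases hiff.2 hG with h | h
    · have hx : ∃ j < S.length, 0 ≤ j ∧ j + 1 < S.length ∧ CondA S S.length j := h
      rw [if_pos hx]
    · by_cases hex : ∃ j < S.length, 0 ≤ j ∧ j + 1 < S.length ∧ CondA S S.length j
      · rw [if_pos hex]
      · rw [if_neg hex, if_pos h]
  · rw [if_neg hG]
    rw [if_neg (show ¬ ∃ j < S.length, 0 ≤ j ∧ j + 1 < S.length ∧ CondA S S.length j from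
      fun hx => hG (hiff.1 (Or.inl hx)))]
    rw [if_neg (fun h => hG (hiff.1 (Or.inr h)))]

theorem getD_set' {α : Type} (l : List α) (i j : Nat) (v d : α) (h : i < l.length) :
    (l.set i v).getD j d = if j = i then v else l.getD j d := by
  unfold List.getD
  rw [List.getElem?_set]
  by_cases h1 : i = j
  · subst h1; simp [h]
  · rw [if_neg h1, if_neg (fun hh => h1 hh.symm)]

def bucketP (n j : Nat) (x : Int) : Bool :=
  if j < n then decide (x = (j : Int)) else decide ((n : Int) ≤ x)

theorem count_split (A : List Int) (k : Int) :
    A.countP (fun x => decide (k < x)) =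
      A.countP (fun x => decide (x = k + 1)) + A.countP (fun x => decide (k + 1 < x)) := by
  induction A with
  | nil => simp
  | cons x A ih =>
    simp only [List.countP_cons, ih]
    split_ifs <;> simp_all <;> omega

theorem bfold_inv (n : Nat) (A : List Int) : ∀ (c : List Int) (p : List Bool),
    c.length = n + 1 → p.length = n + 1 →
    ((A.foldl (bStep n) (c, p)).1.length = n + 1 ∧ (A.foldl (bStep n) (c, p)).2.length = n + 1)
    ∧ (∀ j : Nat, j ≤ n →
        (A.foldl (bStep n) (c, p)).1.getD j 0 = c.getD j 0 + (A.countP (bucketP n j) : Int))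
    ∧ (∀ j : Nat, j < n →
        (A.foldl (bStep n) (c, p)).2.getD j false = (p.getD j false || decide ((j : Int) ∈ A))) := by
  induction A with
  | nil => intro c p hc hp; simp [hc, hp]
  | cons x A ih =>
    intro c p hc hp
    simp only [List.foldl_cons]
    by_cases h1 : 0 ≤ x ∧ x < (n : Int)
    · have hxn : x.toNat < n := by omega
      have hstep : bStep n (c, p) x =
          (c.set x.toNat (c.getD x.toNat 0 + 1), p.set x.toNat true) := by
        simp only [bStep, if_pos h1]
        rw [PySem.List.pySetD_of_nonneg _ _ h1.1, PySem.List.pySetD_of_nonneg _ _ h1.1,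
            PySem.List.pyGetD_of_nonneg _ _ h1.1]
      rw [hstep]
      obtain ⟨hlen, hcnt, hpres⟩ := ih (c.set x.toNat (c.getD x.toNat 0 + 1)) (p.set x.toNat true)
        (by rw [List.length_set]; exact hc) (by rw [List.length_set]; exact hp)
      refine ⟨hlen, ?_, ?_⟩
      · intro j hj
        rw [hcnt j hj, getD_set' c x.toNat j _ 0 (by omega), List.countP_cons]
        by_cases hje : j = x.toNat
        · have hbx : bucketP n j x = true := by
            simp only [bucketP, if_pos (by omega : j < n), decide_eq_true_eq]
            omega
          rw [if_pos hje, hbx, hje]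
          simp only [if_pos trivial]
          push_cast
          ring
        · have hbx : bucketP n j x = false := by
            simp only [bucketP]
            split_ifs <;> simp only [decide_eq_false_iff_not] <;> omega
          rw [if_neg hje, hbx]
          simp
      · intro j hj
        rw [hpres j hj, getD_set' p x.toNat j true false (by omega)]
        by_cases hje : j = x.toNat
        · have hm : (j : Int) ∈ x :: A := by
            have : (j : Int) = x := by omega
            rw [this]; exact List.mem_cons_self
          rw [if_pos hje]
          simp [hm]
        · have hne : ¬ ((j : Int) = x) := by omega
          rw [if_neg hje]
          simp [List.mem_cons, hne]
    · by_cases h2 : (n : Int) ≤ x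
      · have hstep : bStep n (c, p) x = (c.set n (c.getD n 0 + 1), p) := by
          simp only [bStep, if_neg h1, if_pos h2]
          rw [PySem.List.pySetD_natCast, PySem.List.pyGetD_natCast]
        rw [hstep]
        obtain ⟨hlen, hcnt, hpres⟩ := ih (c.set n (c.getD n 0 + 1)) p
          (by rw [List.length_set]; exact hc) hp
        refine ⟨hlen, ?_, ?_⟩
        · intro j hj
          rw [hcnt j hj, getD_set' c n j _ 0 (by omega), List.countP_cons]
          by_cases hje : j = n
          · have hbx : bucketP n j x = true := by
              simp only [bucketP, if_neg (by omega : ¬ j < n), decide_eq_true_eq]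
              omega
            rw [if_pos hje, hbx, hje]
            simp only [if_pos trivial]
            push_cast
            ring
          · have hbx : bucketP n j x = false := by
              simp only [bucketP]
              split_ifs <;> simp only [decide_eq_false_iff_not] <;> omega
            rw [if_neg hje, hbx]
            simp
        · intro j hj
          rw [hpres j hj]
          have hne : ¬ ((j : Int) = x) := by omega
          simp [List.mem_cons, hne]
      · have hstep : bStep n (c, p) x = (c, p) := by
          simp only [bStep, if_neg h1, if_neg h2]
        rw [hstep]
        obtain ⟨hlen, hcnt, hpres⟩ := ih c p hc hp
        refine ⟨hlen, ?_, ?_⟩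
        · intro j hj
          rw [hcnt j hj, List.countP_cons]
          have hbx : bucketP n j x = false := by
            simp only [bucketP]
            split_ifs <;> simp only [decide_eq_false_iff_not] <;> omega
          rw [hbx]
          simp
        · intro j hj
          rw [hpres j hj]
          have hne : ¬ ((j : Int) = x) := by omega
          simp [List.mem_cons, hne]

theorem bLoop_eq (n : Nat) (A : List Int) (cnt : List Int) (pres : List Bool)
    (hc : ∀ j : Nat, j ≤ n → cnt.getD j 0 = (A.countP (bucketP n j) : Int))
    (hp : ∀ j : Nat, j < n → pres.getD j false = decide ((j : Int) ∈ A)) :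
    ∀ m : Nat, m ≤ n → ∀ g : Int,
    (g = if m = n then 0 else (A.countP (fun x => decide ((m : Int) < x)) : Int)) →
    bLoop cnt pres g m =
      if (∃ v : Nat, v < m ∧ (v : Int) ∈ A ∧
          ((A.countP (fun x => decide ((v : Int) < x)) : Int) = (v : Int))) then 1 else -1 := by
  intro m
  induction m with
  | zero => intro _ g _; simp [bLoop]
  | succ k ih =>
    intro hm g hg
    have hcast : ((k : Int) + 1) = (((k + 1 : Nat)) : Int) := by push_cast; ring
    have hkn : k < n := by omega
    simp only [bLoop, hcast, PySem.List.pyGetD_natCast]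
    rw [hc (k + 1) hm, hp k hkn]
    have hg' : g + (A.countP (bucketP n (k + 1)) : Int)
        = (A.countP (fun x => decide ((k : Int) < x)) : Int) := by
      by_cases he : k + 1 = n
      · rw [hg, if_pos he]
        have : A.countP (bucketP n (k + 1)) = A.countP (fun x => decide ((k : Int) < x)) := by
          apply List.countP_congr
          intro x _
          simp only [bucketP, if_neg (by omega : ¬ (k + 1 < n))]
          simp; omega
        rw [this]; ring
      · rw [hg, if_neg (by omega : ¬ (k + 1 = n))]
        have hb : A.countP (bucketP n (k + 1)) = A.countP (fun x => decide (x = (k : Int) + 1)) := by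
          apply List.countP_congr
          intro x _
          simp only [bucketP, if_pos (by omega : k + 1 < n)]
          simp
        have hs := count_split A (k : Int)
        have hc1 : A.countP (fun x => decide (((k + 1 : Nat) : Int) < x))
            = A.countP (fun x => decide ((k : Int) + 1 < x)) := by
          apply List.countP_congr; intro x _; simp
        rw [hb, hc1, hs]
        push_cast; ring
    rw [hg']
    by_cases hcond : (k : Int) ∈ A ∧ (A.countP (fun x => decide ((k : Int) < x)) : Int) = (k : Int)
    · rw [if_pos (by simpa using hcond)]
      rw [if_pos ⟨k, by omega, hcond.1, hcond.2⟩]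
    · rw [if_neg (by simpa using hcond)]
      rw [ih (by omega) _ (by rw [if_neg (by omega : ¬ (k = n))])]
      congr 1
      apply propext
      constructor
      · rintro ⟨v, hv, hmem, hcnt⟩
        refine ⟨v, ?_, hmem, hcnt⟩
        omega
      · rintro ⟨v, hv, hmem, hcnt⟩
        by_cases hvk : v = k
        · exfalso; exact hcond ⟨by rw [← hvk]; exact hmem, by rw [← hvk]; exact hcnt⟩
        · refine ⟨v, ?_, hmem, hcnt⟩
          omega

theorem good_iff (A : List Int) :
    Good A ↔ ∃ v : Nat, v < A.length ∧ (v : Int) ∈ A ∧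
      ((A.countP (fun x => decide ((v : Int) < x)) : Int) = (v : Int)) := by
  constructor
  · rintro ⟨v, hmem, hcnt⟩
    have hv0 : 0 ≤ v := by rw [← hcnt]; positivity
    have hlt : A.countP (fun x => decide (v < x)) < A.length := by
      have hsum := List.length_eq_countP_add_countP (fun x => decide (v < x)) (l := A)
      have hpos : 0 < A.countP (fun a => decide ¬(decide (v < a)) = true) := by
        rw [List.countP_pos_iff]
        exact ⟨v, hmem, by simp⟩
      omega
    refine ⟨v.toNat, by omega, ?_, ?_⟩
    · have : ((v.toNat : Nat) : Int) = v := by omega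
      rw [this]; exact hmem
    · have hcast : ((v.toNat : Nat) : Int) = v := by omega
      rw [hcast, hcnt]
  · rintro ⟨v, _, hmem, hcnt⟩
    exact ⟨(v : Int), hmem, hcnt⟩

theorem solve_alt_eq_good (A : List Int) :
    solve_alt A = if Good A then 1 else -1 := by
  unfold solve_alt
  obtain ⟨hlen, hcnt, hpres⟩ := bfold_inv A.length A
    (List.replicate (A.length + 1) 0) (List.replicate (A.length + 1) false)
    (by simp) (by simp)
  rw [bLoop_eq A.length A _ _
    (fun j hj => by rw [hcnt j hj, List.getD_replicate _ (by omega)]; ring)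
    (fun j hj => by rw [hpres j hj, List.getD_replicate _ (by omega)]; simp)
    A.length le_rfl 0 (by simp)]
  have h := good_iff A
  by_cases hG : Good A
  · rw [if_pos (by
      obtain ⟨v, hv, hm, hcn⟩ := h.mp hG
      exact ⟨v, hv, hm, hcn⟩), if_pos hG]
  · rw [if_neg (fun hex => hG (h.mpr (by
      obtain ⟨v, hv, hm, hcn⟩ := hex
      exact ⟨v, hv, hm, hcn⟩))), if_neg hG]

-- ===== VERDICT (by name: the statement is the Claim_ definition above) =====
theorem solve_spec : Claim_equal_solve := by
  intro A _ hpre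
  unfold Spec_solve
  rw [solve_eq_good A hpre, solve_alt_eq_good A]

@[simp] theorem solve_raises : Claim_raises_solve := by
  unfold Claim_raises_solve
  exact ⟨fun A _ h hp => hp h, by decide, by decide, by decide⟩
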